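-- pv_equiv track=rewrite | github.com/ArinaArtiukevich/algorithms_practice | basic/firist_project/class/1_1_linear_search/two_passes/5_shortest_words.py | get_shortest_words_class
-- ===== SOURCE A (Python) =====
-- def get_shortest_words_class(seq: list[str]) -> str:
--     if len(seq) == 0:
--         result = None
--     else:
--         shortest_words = []
--         min_len = len(seq[0])
--         for i in range(1, len(seq)):
--             if len(seq[i]) < min_len:
--                 min_len = len(seq[i])
--         for i in range(len(seq)):
--             if len(seq[i]) == min_len:
--                 # О(1)
--                 shortest_words.append(seq[i])
--         result = ' '.join(shortest_words)
--     return result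
-- ===== SOURCE B (Python) =====
-- def get_shortest_words_class(seq: list[str]) -> str:
--     if len(seq) == 0:
--         return None
--     min_len = len(seq[0])
--     shortest_words = [seq[0]]
--     for word in seq[1:]:
--         l = len(word)
--         if l < min_len:
--             min_len = l
--             shortest_words = [word]
--         elif l == min_len:
--             shortest_words.append(word)
--     return ' '.join(shortest_words)
-- ===== Notes on version B (the rewrite author's own statement) =====
-- stated objective: alternative
-- what changed: Single pass maintaining the current minimum length and the list of words of that length together (reset on new minimum, append on tie), instead of one pass to find the minimum and a second pass to collect matches.
import Mathlib
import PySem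

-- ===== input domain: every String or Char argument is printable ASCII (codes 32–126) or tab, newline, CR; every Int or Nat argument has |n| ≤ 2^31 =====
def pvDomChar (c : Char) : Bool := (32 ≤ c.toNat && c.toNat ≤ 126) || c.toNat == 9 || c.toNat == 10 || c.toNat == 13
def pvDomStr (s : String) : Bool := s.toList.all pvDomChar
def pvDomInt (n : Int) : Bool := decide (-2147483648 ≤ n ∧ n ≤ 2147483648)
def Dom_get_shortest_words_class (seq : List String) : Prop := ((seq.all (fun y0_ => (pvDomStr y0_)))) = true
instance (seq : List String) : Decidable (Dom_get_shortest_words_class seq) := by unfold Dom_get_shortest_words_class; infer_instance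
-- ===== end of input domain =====

-- B replaces A's two passes (find the minimum length, then rescan to collect matching words)
-- with one pass that maintains the minimum and the collected words together; same cost,
-- different decomposition.


-- ===== PORT A =====
-- literal transliteration of A: first loop over range(1, len(seq)) finds min_len,
-- second loop over range(len(seq)) appends words of that length, then ' '.join.
def get_shortest_words_class (seq : List String) : Option String :=
  if (PySem.List.len seq) = 0 then none
  else
    let min_len0 : Int := PySem.Str.len (PySem.List.pyGetD seq 0 "")
    let min_len : Int :=
      (PySem.List.pyRange 1 (PySem.List.len seq) 1).foldl
        (fun m i =>
          if PySem.Str.len (PySem.List.pyGetD seq i "") < m then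
            PySem.Str.len (PySem.List.pyGetD seq i "")
          else m) min_len0
    let shortest_words : List String :=
      (PySem.List.pyRange 0 (PySem.List.len seq) 1).foldl
        (fun ws i =>
          if PySem.Str.len (PySem.List.pyGetD seq i "") = min_len then
            ws ++ [PySem.List.pyGetD seq i ""]
          else ws) []
    some (PySem.Str.join " " shortest_words)

-- ===== PORT B =====
-- literal transliteration of B: one fold over seq[1:] carrying (min_len, shortest_words):
-- reset on a strictly smaller length, append on a tie.
def get_shortest_words_class_alt (seq : List String) : Option String :=
  match seq with
  | [] => none
  | w0 :: rest =>
    let st : Int × List String :=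
      rest.foldl
        (fun (st : Int × List String) w =>
          let l := PySem.Str.len w
          if l < st.1 then (l, [w])
          else if l = st.1 then (st.1, st.2 ++ [w])
          else st)
        (PySem.Str.len w0, [w0])
    some (PySem.Str.join " " st.2)

-- ===== PRECONDITION & SPEC =====
def Spec_get_shortest_words_class (seq : List String) (out : Option String) : Prop := out = get_shortest_words_class_alt seq
instance (seq : List String) (out : Option String) : Decidable (Spec_get_shortest_words_class seq out) := by unfold Spec_get_shortest_words_class; infer_instance

-- ===== CLAIM (what is proved, stated in full; the proofs are below) =====
def Claim_equal_get_shortest_words_class : Prop := ∀ (seq : List String), Dom_get_shortest_words_class seq → Spec_get_shortest_words_class seq (get_shortest_words_class seq)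

-- ===== LEMMAS AND PROOFS =====

-- A's first loop as a plain fold over the words.
def pvMinFold (l : List String) (m0 : Int) : Int :=
  l.foldl (fun m w => if PySem.Str.len w < m then PySem.Str.len w else m) m0

-- B's loop body, named for the proofs (definitionally equal to the lambda in the port).
def pvStep (st : Int × List String) (w : String) : Int × List String :=
  let l := PySem.Str.len w
  if l < st.1 then (l, [w])
  else if l = st.1 then (st.1, st.2 ++ [w])
  else st

-- B's loop invariant: starting from the running minimum m over some already-seen words zs
-- (all of length ≥ m) together with the zs-words of length exactly m, folding over rest
-- yields the running minimum over zs ++ rest and the matching filter of zs ++ rest.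
theorem pvB_inv (rest : List String) :
    ∀ (m : Int) (zs : List String),
      (∀ z ∈ zs, m ≤ PySem.Str.len z) →
      (rest.foldl pvStep (m, zs.filter (fun w => PySem.Str.len w = m))).1 = pvMinFold rest m ∧
      (∀ z ∈ zs ++ rest, pvMinFold rest m ≤ PySem.Str.len z) ∧
      (rest.foldl pvStep (m, zs.filter (fun w => PySem.Str.len w = m))).2
        = (zs ++ rest).filter (fun w => PySem.Str.len w = pvMinFold rest m) := by
  induction rest with
  | nil =>
    intro m zs hge
    refine ⟨rfl, by simpa using hge, by simp [pvMinFold]⟩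
  | cons w rest ih =>
    intro m zs hge
    have hmf : pvMinFold (w :: rest) m
        = pvMinFold rest (if PySem.Str.len w < m then PySem.Str.len w else m) := rfl
    by_cases h1 : PySem.Str.len w < m
    · -- strictly smaller: reset
      have hzs : zs.filter (fun z => PySem.Str.len z = PySem.Str.len w) = [] := by
        apply List.filter_eq_nil_iff.mpr
        intro z hz
        have hz' := hge z hz
        simp only [decide_eq_true_eq]
        omega
      have hstep : pvStep (m, zs.filter (fun w' => PySem.Str.len w' = m)) w
          = (PySem.Str.len w, [w]) := by
        simp only [pvStep]
        rw [if_pos h1]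
      have hge' : ∀ z ∈ zs ++ [w], PySem.Str.len w ≤ PySem.Str.len z := by
        intro z hz
        rcases List.mem_append.mp hz with hz | hz
        · have := hge z hz; omega
        · simp at hz; subst hz; omega
      have hfil : (zs ++ [w]).filter (fun z => PySem.Str.len z = PySem.Str.len w) = [w] := by
        rw [List.filter_append, hzs]; simp
      have hih := ih (PySem.Str.len w) (zs ++ [w]) hge'
      rw [hfil] at hih
      obtain ⟨ha, hb, hc⟩ := hih
      refine ⟨?_, ?_, ?_⟩
      · rw [List.foldl_cons, hstep, ha, hmf, if_pos h1]
      · intro z hz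
        rw [hmf, if_pos h1]
        apply hb
        simp at hz ⊢; tauto
      · rw [List.foldl_cons, hstep, hmf, if_pos h1, hc]
        congr 1
        simp
    · have hge' : ∀ z ∈ zs ++ [w], m ≤ PySem.Str.len z := by
        intro z hz
        rcases List.mem_append.mp hz with hz | hz
        · exact hge z hz
        · simp at hz; subst hz; omega
      have hih := ih m (zs ++ [w]) hge'
      obtain ⟨ha, hb, hc⟩ := hih
      by_cases h2 : PySem.Str.len w = m
      · -- tie: append
        have hstep : pvStep (m, zs.filter (fun w' => PySem.Str.len w' = m)) w
            = (m, zs.filter (fun w' => PySem.Str.len w' = m) ++ [w]) := by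
          simp only [pvStep]
          rw [if_neg h1, if_pos h2]
        have hfil : (zs ++ [w]).filter (fun z => PySem.Str.len z = m)
            = zs.filter (fun z => PySem.Str.len z = m) ++ [w] := by
          have h2' : (w.length : Int) = m := by simpa using h2
          rw [List.filter_append]; simp [h2']
        rw [hfil] at ha hc
        refine ⟨?_, ?_, ?_⟩
        · rw [List.foldl_cons, hstep, ha, hmf, if_neg h1]
        · intro z hz
          rw [hmf, if_neg h1]
          apply hb
          simp at hz ⊢; tauto
        · rw [List.foldl_cons, hstep, hmf, if_neg h1, hc]
          congr 1
          simp
      · -- strictly larger: state unchanged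
        have hstep : pvStep (m, zs.filter (fun w' => PySem.Str.len w' = m)) w
            = (m, zs.filter (fun w' => PySem.Str.len w' = m)) := by
          simp only [pvStep]
          rw [if_neg h1, if_neg h2]
        have hfil : (zs ++ [w]).filter (fun z => PySem.Str.len z = m)
            = zs.filter (fun z => PySem.Str.len z = m) := by
          have h2' : ¬ (w.length : Int) = m := by simpa using h2
          rw [List.filter_append]; simp [h2']
        rw [hfil] at ha hc
        refine ⟨?_, ?_, ?_⟩
        · rw [List.foldl_cons, hstep, ha, hmf, if_neg h1]
        · intro z hz
          rw [hmf, if_neg h1]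
          apply hb
          simp at hz ⊢; tauto
        · rw [List.foldl_cons, hstep, hmf, if_neg h1, hc]
          congr 1
          simp

-- ===== VERDICT (by name: the statement is the Claim_ definition above) =====
theorem get_shortest_words_class_spec : Claim_equal_get_shortest_words_class := by
  intro seq _
  unfold Spec_get_shortest_words_class
  cases seq with
  | nil => rfl
  | cons w0 rest =>
    simp only [get_shortest_words_class, get_shortest_words_class_alt,
      PySem.List.len_eq, List.length_cons, PySem.List.pyGetD_zero_cons]
    rw [if_neg (by omega : ¬ ((rest.length + 1 : Nat) : Int) = 0)]
    have hlen2 : ((rest.length + 1 : Nat) : Int) = ((w0 :: rest).length : Int) := by simp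
    rw [hlen2]
    rw [PySem.List.foldl_pyRange_pyGetD' (w0 :: rest) ""
        (fun m w => if PySem.Str.len w < m then PySem.Str.len w else m)
        (PySem.Str.len w0) (by norm_num : (0:Int) ≤ 1)]
    simp only [Int.toNat_one, List.drop_succ_cons, List.drop_zero]
    have hmf : List.foldl (fun m w => if PySem.Str.len w < m then PySem.Str.len w else m)
        (PySem.Str.len w0) rest = pvMinFold rest (PySem.Str.len w0) := rfl
    simp only [hmf]
    rw [PySem.List.foldl_pyRange_zero_pyGetD' (w0 :: rest) ""
        (fun ws w => if PySem.Str.len w = pvMinFold rest (PySem.Str.len w0) then ws ++ [w] else ws) []]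
    rw [PySem.List.foldl_append_ite_eq_filter
        (fun w => PySem.Str.len w = pvMinFold rest (PySem.Str.len w0)) (w0 :: rest) []]
    have hlam : (fun (st : Int × List String) w =>
        let l := PySem.Str.len w
        if l < st.1 then (l, [w])
        else if l = st.1 then (st.1, st.2 ++ [w])
        else st) = pvStep := rfl
    rw [hlam]
    have hinv := pvB_inv rest (PySem.Str.len w0) [w0]
      (by intro z hz; simp at hz; subst hz; exact le_rfl)
    have hstart : ([w0].filter (fun w => PySem.Str.len w = PySem.Str.len w0)) = [w0] := by simp
    rw [hstart] at hinv
    rw [hinv.2.2]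
    simp
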